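-- pv_equiv track=rewrite | github.com/vinivin153/problem-solving | Programmers/유전법칙.py | dfs
-- ===== SOURCE A (Python) =====
-- def dfs(gen, idx):
--     if gen == 1:
--         return "Rr"
--
--     parent = dfs(gen - 1, (idx - 1) // 4 + 1)
--
--     if parent == "RR" or parent == "rr":
--         return parent
--
--     res = (idx - 1) % 4
--
--     if res == 0:
--         return "RR"
--     if res == 3:
--         return "rr"
--
--     return "Rr"
-- ===== SOURCE B (Python) =====
-- def dfs(gen, idx):
--     result = "Rr"
--     i = idx
--     for g in range(gen, 1, -1):
--         res = (i - 1) % 4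
--         if res == 0:
--             result = "RR"
--         elif res == 3:
--             result = "rr"
--         i = (i - 1) // 4 + 1
--     return result
-- ===== Notes on version B (the rewrite author's own statement) =====
-- stated objective: alternative
-- what changed: Replaces the parent-first recursion with an iterative descending loop that overwrites the result top-down (the smallest-generation homozygous level writes last), so no recursion and no early return.
-- outside the precondition, e.g. on dfs(0, 1): A raises RecursionError, B returns 'Rr'; on dfs(20000, 1): A raises RecursionError, B returns 'RR'
import Mathlib
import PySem

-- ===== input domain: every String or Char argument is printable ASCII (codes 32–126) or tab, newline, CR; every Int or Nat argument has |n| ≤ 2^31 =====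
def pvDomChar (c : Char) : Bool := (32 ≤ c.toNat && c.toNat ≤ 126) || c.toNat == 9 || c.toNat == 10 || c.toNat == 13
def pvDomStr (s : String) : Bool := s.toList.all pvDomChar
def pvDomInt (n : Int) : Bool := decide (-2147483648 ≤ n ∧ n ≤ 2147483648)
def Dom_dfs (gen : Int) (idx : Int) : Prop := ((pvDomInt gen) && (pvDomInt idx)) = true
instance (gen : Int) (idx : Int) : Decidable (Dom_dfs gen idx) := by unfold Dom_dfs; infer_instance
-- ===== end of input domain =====

-- B replaces A's parent-first recursion by a descending iterative loop (same O(gen) cost);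
-- equivalence is proved for 1 ≤ gen ≤ 9900 (elsewhere A raises RecursionError, see Pre_).

-- ===== PORT A =====
-- A recurses on gen; for gen < 1 the Python never returns (RecursionError), so the
-- port recurses on gen.toNat (fuel 0, reached only outside Pre_, returns "Rr").
def dfsGoA : Nat → Int → String
  | 0, _ => "Rr"
  | 1, _ => "Rr"
  | n + 2, idx =>
    let parent := dfsGoA (n + 1) (PySem.Int.floordiv (idx - 1) 4 + 1)
    if parent = "RR" ∨ parent = "rr" then parent
    else
      let res := PySem.Int.mod (idx - 1) 4
      if res = 0 then "RR"
      else if res = 3 then "rr"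
      else "Rr"

def dfs (gen : Int) (idx : Int) : String := dfsGoA gen.toNat idx

-- ===== PORT B =====
-- literal port of Source B: result/i state folded over range(gen, 1, -1)
def dfs_alt (gen : Int) (idx : Int) : String :=
  ((PySem.List.pyRange gen 1 (-1)).foldl
    (fun (st : String × Int) _ =>
      let res := PySem.Int.mod (st.2 - 1) 4
      let result := if res = 0 then "RR" else if res = 3 then "rr" else st.1
      (result, PySem.Int.floordiv (st.2 - 1) 4 + 1))
    ("Rr", idx)).1

-- ===== PRECONDITION & SPEC =====
-- Pre_ excludes gen < 1, where A recurses forever (RecursionError), and gen > 9900,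
-- where A's recursion depth gen exceeds the interpreter's configured recursion limit
-- (10000 here) and A raises RecursionError; B returns a value at both kinds of input.
def Pre_dfs (gen : Int) (idx : Int) : Prop := 1 ≤ gen ∧ gen ≤ 9900
instance (gen : Int) (idx : Int) : Decidable (Pre_dfs gen idx) := by unfold Pre_dfs; infer_instance
def pvWitness_dfs : Int × Int := (3, 5)

def Spec_dfs (gen : Int) (idx : Int) (out : String) : Prop := out = dfs_alt gen idx
instance (gen : Int) (idx : Int) (out : String) : Decidable (Spec_dfs gen idx out) := by unfold Spec_dfs; infer_instance

-- ===== CLAIM (what is proved, stated in full; the proofs are below) =====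
def Claim_equal_dfs : Prop := ∀ (gen : Int) (idx : Int), Dom_dfs gen idx → Pre_dfs gen idx → Spec_dfs gen idx (dfs gen idx)

-- ===== LEMMAS AND PROOFS =====

-- B's loop body ignores the loop variable, so the fold only depends on the list's length
def loopB : Nat → Int → String → String
  | 0, _, acc => acc
  | n + 1, i, acc =>
    let res := PySem.Int.mod (i - 1) 4
    loopB n (PySem.Int.floordiv (i - 1) 4 + 1)
      (if res = 0 then "RR" else if res = 3 then "rr" else acc)

theorem foldl_eq_loopB (l : List Int) : ∀ (acc : String) (i : Int),
    (l.foldl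
      (fun (st : String × Int) _ =>
        let res := PySem.Int.mod (st.2 - 1) 4
        let result := if res = 0 then "RR" else if res = 3 then "rr" else st.1
        (result, PySem.Int.floordiv (st.2 - 1) 4 + 1))
      (acc, i)).1 = loopB l.length i acc := by
  induction l with
  | nil => intro acc i; simp [loopB]
  | cons x xs ih =>
    intro acc i
    simp only [List.foldl_cons, List.length_cons, loopB]
    exact ih _ _

-- dfsGoA only ever returns one of the three genotype strings
theorem dfsGoA_cases (n : Nat) : ∀ (i : Int),
    dfsGoA n i = "RR" ∨ dfsGoA n i = "rr" ∨ dfsGoA n i = "Rr" := by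
  induction n with
  | zero => intro i; simp [dfsGoA]
  | succ n ih =>
    intro i
    match n, ih with
    | 0, _ => simp [dfsGoA]
    | m + 1, ih =>
      simp only [dfsGoA]
      split
      · next hc => exact hc.imp id Or.inl
      · split
        · simp
        · split <;> simp

-- A's recursion propagates the deepest homozygous level upward; loopB overwrites
-- top-down, so the accumulator survives exactly when A returns "Rr".
theorem loopB_eq_dfsGoA (n : Nat) : ∀ (i : Int) (acc : String),
    loopB n i acc = if dfsGoA (n + 1) i = "Rr" then acc else dfsGoA (n + 1) i := by
  induction n with
  | zero => intro i acc; simp [loopB, dfsGoA]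
  | succ n ih =>
    intro i acc
    simp only [loopB, dfsGoA]
    rw [ih]
    set p := PySem.Int.floordiv (i - 1) 4 + 1
    set res := PySem.Int.mod (i - 1) 4
    by_cases hp : dfsGoA (n + 1) p = "RR" ∨ dfsGoA (n + 1) p = "rr"
    · have h1 : dfsGoA (n + 1) p ≠ "Rr" := by rcases hp with h | h <;> simp [h]
      simp [hp, h1]
    · have h1 : dfsGoA (n + 1) p = "Rr" := by
        rcases dfsGoA_cases (n + 1) p with h | h | h
        · exact absurd (Or.inl h) hp
        · exact absurd (Or.inr h) hp
        · exact h
      simp only [h1, if_pos]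
      by_cases h0 : res = 0
      · simp [h0]
      · by_cases h3 : res = 3 <;> simp [h0, h3]

-- ===== VERDICT (by name: the statement is the Claim_ definition above) =====
theorem dfs_spec : Claim_equal_dfs := by
  intro gen idx _ hpre
  obtain ⟨hga, hgb⟩ := hpre
  unfold Spec_dfs dfs dfs_alt
  rw [foldl_eq_loopB, PySem.List.length_pyRange_neg_one, loopB_eq_dfsGoA]
  have hg : ((gen - 1).toNat + 1) = gen.toNat := by omega
  rw [hg]
  split <;> simp_all
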